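-- pv_equiv track=rewrite | github.com/dmc-au/data-science | spark/pyspark/Map_reduce/CSV_filtering/rdd.py | mf
-- ===== SOURCE A (Python) =====
-- def mf(rdd):
--     values = dict(rdd[1])
--     reduced = dict()
--     top = max(values.values())
--     for k, v in values.items():
--         if v == top:
--             reduced[k] = v
--     return (rdd[0], list(reduced.items()))
-- ===== SOURCE B (Python) =====
-- def mf(rdd):
--     values = dict(rdd[1])
--     groups = {}
--     for k, v in values.items():
--         groups.setdefault(v, []).append(k)
--     top = max(groups)
--     return (rdd[0], [(k, top) for k in groups[top]])
-- ===== Notes on version B (the rewrite author's own statement) =====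
-- stated objective: alternative
-- what changed: Instead of computing the max of all values and then filtering the dict for matching entries, B makes one grouping pass building a dict from each value to its ordered list of keys, takes the max group key, and emits that single bucket's keys paired with it.
import Mathlib
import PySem

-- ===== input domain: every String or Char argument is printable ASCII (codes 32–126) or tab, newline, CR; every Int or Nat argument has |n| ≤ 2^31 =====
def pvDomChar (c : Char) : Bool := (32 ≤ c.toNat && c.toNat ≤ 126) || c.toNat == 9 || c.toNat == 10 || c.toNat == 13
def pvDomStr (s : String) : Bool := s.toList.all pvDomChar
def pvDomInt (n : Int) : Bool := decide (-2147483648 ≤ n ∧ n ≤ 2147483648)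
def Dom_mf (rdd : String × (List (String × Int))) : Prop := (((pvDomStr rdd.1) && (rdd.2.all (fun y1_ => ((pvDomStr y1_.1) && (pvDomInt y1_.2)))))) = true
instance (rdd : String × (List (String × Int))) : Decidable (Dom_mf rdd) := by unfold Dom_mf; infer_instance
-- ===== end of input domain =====

-- B replaces A's "find max of all values, then filter the dict" with a single grouping
-- pass (value -> ordered keys) followed by picking the max bucket (objective: alternative).

-- ===== PORT A =====
-- values = dict(rdd[1]); top = max(values.values()); keep items with v == top.
-- max() raises ValueError on an empty dict: Pre_mf excludes rdd.2 = []; the `none`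
-- branch below is only that excluded case, totalized with a dummy value.
def mf (rdd : String × (List (String × Int))) : String × (List (String × Int)) :=
  let values : PySem.Dict String Int := PySem.Dict.ofList rdd.2
  match PySem.List.max? values.values (fun v => v) with
  | none => (rdd.1, [])   -- Python raises ValueError here (excluded by Pre_mf)
  | some top =>
      let reduced : PySem.Dict String Int :=
        values.items.foldl (fun d kv => if kv.2 = top then d.insert kv.1 kv.2 else d)
          PySem.Dict.empty
      (rdd.1, reduced.items)

-- ===== PORT B =====
-- values = dict(rdd[1]); groups: value -> ordered list of keys; top = max(groups);
-- result = [(k, top) for k in groups[top]].  max() on the empty dict raises: same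
-- excluded case, totalized with the same dummy value.
def mf_alt (rdd : String × (List (String × Int))) : String × (List (String × Int)) :=
  let values : PySem.Dict String Int := PySem.Dict.ofList rdd.2
  let groups : PySem.Dict Int (List String) :=
    values.items.foldl (fun g kv => g.insert kv.2 (g.getD kv.2 [] ++ [kv.1]))
      PySem.Dict.empty
  match PySem.List.max? groups.keys (fun v => v) with
  | none => (rdd.1, [])   -- Python raises ValueError here (excluded by Pre_mf)
  | some top => (rdd.1, (groups.getD top []).map (fun k => (k, top)))

-- ===== PRECONDITION & SPEC =====
-- Pre_mf excludes only the empty pair list, on which A's max() raises ValueError.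
def Pre_mf (rdd : String × (List (String × Int))) : Prop := rdd.2 ≠ []
instance (rdd : String × (List (String × Int))) : Decidable (Pre_mf rdd) := by unfold Pre_mf; infer_instance

def pvWitness_mf : (String × (List (String × Int))) := ("line", [("a", 2), ("b", 1), ("c", 2)])

def Spec_mf (rdd : String × (List (String × Int))) (out : String × (List (String × Int))) : Prop := out = mf_alt rdd
instance (rdd : String × (List (String × Int))) (out : String × (List (String × Int))) : Decidable (Spec_mf rdd out) := by unfold Spec_mf; infer_instance

-- ===== CLAIM (what is proved, stated in full; the proofs are below) =====
def Claim_equal_mf : Prop := ∀ (rdd : String × (List (String × Int))), Dom_mf rdd → Pre_mf rdd → Spec_mf rdd (mf rdd)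

-- ===== LEMMAS AND PROOFS =====

-- max over a list of Ints (no key) depends only on which Ints occur in the list.
theorem max?_id_eq_of_mem_iff (xs ys : List Int) (h : ∀ x : Int, x ∈ xs ↔ x ∈ ys) :
    PySem.List.max? xs (fun v => v) = PySem.List.max? ys (fun v => v) := by
  cases hx : PySem.List.max? xs (fun v => v) with
  | none =>
      cases hy : PySem.List.max? ys (fun v => v) with
      | none => rfl
      | some m =>
          exfalso
          have hm : m ∈ xs := (h m).2 (PySem.List.max?_mem hy)
          rw [(PySem.List.max?_eq_none_iff xs _).1 hx] at hm
          exact (List.not_mem_nil) hm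
  | some m =>
      cases hy : PySem.List.max? ys (fun v => v) with
      | none =>
          exfalso
          have hm : m ∈ ys := (h m).1 (PySem.List.max?_mem hx)
          rw [(PySem.List.max?_eq_none_iff ys _).1 hy] at hm
          exact (List.not_mem_nil) hm
      | some m' =>
          have h1 : m ≤ m' := PySem.List.max?_isMax hy m ((h m).1 (PySem.List.max?_mem hx))
          have h2 : m' ≤ m := PySem.List.max?_isMax hx m' ((h m').2 (PySem.List.max?_mem hy))
          rw [le_antisymm h1 h2]

-- B's grouping invariant: the bucket at t collects, in order, the keys of the pairs whose value is t.
theorem groups_getD (l : List (String × Int)) (g : PySem.Dict Int (List String)) (t : Int) :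
    (l.foldl (fun g kv => g.insert kv.2 (g.getD kv.2 [] ++ [kv.1])) g).getD t []
      = g.getD t [] ++ (l.filter (fun kv => kv.2 = t)).map Prod.fst := by
  induction l generalizing g with
  | nil => simp
  | cons p l ih =>
      simp only [List.foldl_cons, ih, List.filter_cons]
      rw [PySem.Dict.getD_insert]
      by_cases hp : p.2 = t
      · simp [hp]
      · simp [hp, Ne.symm hp]

-- every pair kept by A's filter has value top, so re-attaching top is the identity
theorem filter_snd_eq_map (l : List (String × Int)) (t : Int) :
    ((l.filter (fun kv => kv.2 = t)).map Prod.fst).map (fun k => (k, t))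
      = l.filter (fun kv => kv.2 = t) := by
  rw [List.map_map]
  have : ∀ p ∈ l.filter (fun kv => decide (kv.2 = t)), ((fun k => (k, t)) ∘ Prod.fst) p = id p := by
    intro p hp
    have := List.of_mem_filter hp
    simp only [decide_eq_true_eq] at this
    simp [Function.comp, ← this]
  rw [List.map_congr_left this, List.map_id]

-- ===== VERDICT (by name: the statement is the Claim_ definition above) =====
theorem mf_spec : Claim_equal_mf := by
  intro rdd _ hpre
  show mf rdd = mf_alt rdd
  unfold mf mf_alt
  simp only []
  set values : PySem.Dict String Int := PySem.Dict.ofList rdd.2 with hvalues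
  set groups : PySem.Dict Int (List String) :=
    values.items.foldl (fun g kv => g.insert kv.2 (g.getD kv.2 [] ++ [kv.1]))
      PySem.Dict.empty with hgroups
  -- groups' keys are exactly the distinct values of `values`
  have hkeys : groups.keys = PySem.Set.ofList values.values := by
    rw [hgroups, PySem.Dict.keys_foldl_insert_key values.items Prod.snd
          (fun g kv => g.getD kv.2 [] ++ [kv.1]) PySem.Dict.empty]
    rw [PySem.Dict.keys_empty]
    rfl
  have hmemiff : ∀ x : Int, x ∈ values.values ↔ x ∈ groups.keys := by
    intro x
    rw [hkeys, PySem.Set.mem_ofList]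
  have hmax : PySem.List.max? values.values (fun v => v)
      = PySem.List.max? groups.keys (fun v => v) :=
    max?_id_eq_of_mem_iff _ _ hmemiff
  rw [← hmax]
  cases htop : PySem.List.max? values.values (fun v => v) with
  | none => rfl
  | some top =>
      -- both sides are (rdd.1, list); compare the lists
      refine Prod.ext rfl ?_
      show (values.items.foldl
              (fun d kv => if kv.2 = top then d.insert kv.1 kv.2 else d)
              PySem.Dict.empty).items
            = (groups.getD top []).map (fun k => (k, top))
      -- A's loop = inserting exactly the filtered pairs, all with fresh keys
      have hfold : (values.items.foldl
              (fun d kv => if kv.2 = top then d.insert kv.1 kv.2 else d)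
              PySem.Dict.empty)
          = (values.items.filter (fun kv => kv.2 = top)).foldl
              (fun d kv => d.insert kv.1 kv.2) PySem.Dict.empty := by
        rw [List.foldl_filter]
        simp only [decide_eq_true_eq]
      have hnodup : ((values.items.filter (fun kv => kv.2 = top)).map Prod.fst).Nodup := by
        have hsub : (values.items.filter (fun kv => kv.2 = top)).Sublist values.items :=
          List.filter_sublist
        exact (PySem.Dict.nodup_keys_ofList rdd.2).sublist (hsub.map Prod.fst)
      have hfresh : ∀ a ∈ values.items.filter (fun kv => kv.2 = top),
          (PySem.Dict.empty : PySem.Dict String Int).contains a.1 = false := by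
        intro a _; exact PySem.Dict.contains_empty a.1
      have hitems := PySem.Dict.items_foldl_insert_fresh
        (values.items.filter (fun kv => kv.2 = top)) Prod.fst Prod.snd
        PySem.Dict.empty hfresh hnodup
      rw [hfold, hitems]
      have : (PySem.Dict.empty : PySem.Dict String Int).items = [] := rfl
      rw [this, List.nil_append]
      -- B's bucket at top
      rw [hgroups, groups_getD values.items PySem.Dict.empty top]
      have : (PySem.Dict.empty : PySem.Dict Int (List String)).getD top [] = [] := rfl
      rw [this, List.nil_append, filter_snd_eq_map]
      simp
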